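-- pv_equiv track=rewrite | github.com/BenjaminAnding/sturdy-chainsaw | Level4/bringing-a-gun-to-a-guard-fight_solution.py | get_mirror
-- ===== SOURCE A (Python) =====
-- def get_mirror(nth_reflection, coordinate, dimension):
--     result = coordinate
--     distances_from_walls = [2*coordinate, 2*(dimension-coordinate)]
--     if(nth_reflection < 0):
--         for i in range(nth_reflection, 0):
--             result -= distances_from_walls[(i+1) % 2]
--     else:
--         for i in range(nth_reflection, 0, -1):
--             result += distances_from_walls[i % 2]
--     return result
-- ===== SOURCE B (Python) =====
-- def get_mirror(nth_reflection, coordinate, dimension):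
--     # Closed form: count how many reflections hit each wall and multiply.
--     if nth_reflection >= 0:
--         near = nth_reflection // 2           # bounces using distance 2*coordinate
--         far = nth_reflection - near          # bounces using distance 2*(dimension-coordinate)
--         return coordinate + 2 * coordinate * near + 2 * (dimension - coordinate) * far
--     m = -nth_reflection
--     near = (m + 1) // 2
--     far = m - near
--     return coordinate - 2 * coordinate * near - 2 * (dimension - coordinate) * far
-- ===== Notes on version B (the rewrite author's own statement) =====
-- stated objective: faster
-- what changed: Replaces the per-reflection loop with a closed form: count the bounces off each wall (parity counts of the range) and multiply the two wall distances by those counts.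
import Mathlib
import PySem

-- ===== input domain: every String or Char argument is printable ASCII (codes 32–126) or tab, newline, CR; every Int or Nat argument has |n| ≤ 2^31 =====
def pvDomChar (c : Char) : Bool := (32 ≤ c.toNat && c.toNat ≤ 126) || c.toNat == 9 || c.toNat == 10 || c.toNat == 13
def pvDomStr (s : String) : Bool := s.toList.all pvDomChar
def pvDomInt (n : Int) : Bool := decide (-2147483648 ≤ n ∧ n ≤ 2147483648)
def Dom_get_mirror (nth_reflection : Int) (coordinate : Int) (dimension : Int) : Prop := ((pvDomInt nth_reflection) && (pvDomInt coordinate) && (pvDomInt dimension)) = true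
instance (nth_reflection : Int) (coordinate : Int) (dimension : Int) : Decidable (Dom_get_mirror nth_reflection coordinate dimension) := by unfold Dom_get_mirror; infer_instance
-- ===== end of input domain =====

-- B replaces A's per-reflection loop with an O(1) closed form (parity counts times wall distances).

-- ===== PORT A =====
def get_mirror (nth_reflection : Int) (coordinate : Int) (dimension : Int) : Int :=
  let distances_from_walls := [2 * coordinate, 2 * (dimension - coordinate)]
  if nth_reflection < 0 then
    (PySem.List.pyRange nth_reflection 0 1).foldl
      (fun result i => result - PySem.List.pyGetD distances_from_walls (PySem.Int.mod (i + 1) 2) 0)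
      coordinate
  else
    (PySem.List.pyRange nth_reflection 0 (-1)).foldl
      (fun result i => result + PySem.List.pyGetD distances_from_walls (PySem.Int.mod i 2) 0)
      coordinate

-- ===== PORT B =====
def get_mirror_alt (nth_reflection : Int) (coordinate : Int) (dimension : Int) : Int :=
  if nth_reflection ≥ 0 then
    let near := PySem.Int.floordiv nth_reflection 2
    let far := nth_reflection - near
    coordinate + 2 * coordinate * near + 2 * (dimension - coordinate) * far
  else
    let m := -nth_reflection
    let near := PySem.Int.floordiv (m + 1) 2
    let far := m - near
    coordinate - 2 * coordinate * near - 2 * (dimension - coordinate) * far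

-- ===== PRECONDITION & SPEC =====
def Spec_get_mirror (nth_reflection : Int) (coordinate : Int) (dimension : Int) (out : Int) : Prop := out = get_mirror_alt nth_reflection coordinate dimension
instance (nth_reflection : Int) (coordinate : Int) (dimension : Int) (out : Int) : Decidable (Spec_get_mirror nth_reflection coordinate dimension out) := by unfold Spec_get_mirror; infer_instance

-- ===== CLAIM (what is proved, stated in full; the proofs are below) =====
def Claim_equal_get_mirror : Prop := ∀ (nth_reflection : Int) (coordinate : Int) (dimension : Int), Dom_get_mirror nth_reflection coordinate dimension → Spec_get_mirror nth_reflection coordinate dimension (get_mirror nth_reflection coordinate dimension)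

-- ===== LEMMAS AND PROOFS =====

-- A's upward loop (nth_reflection ≥ 0): adds 2c for each even i in 1..m and 2(d-c) for each odd i.
lemma up_loop (c d : Int) : ∀ (m : Nat) (acc : Int),
    (PySem.List.pyRange (m : Int) 0 (-1)).foldl
      (fun result i => result + PySem.List.pyGetD [2 * c, 2 * (d - c)] (PySem.Int.mod i 2) 0) acc
    = acc + 2 * c * ((m / 2 : Nat) : Int) + 2 * (d - c) * (((m + 1) / 2 : Nat) : Int) := by
  intro m
  induction m with
  | zero => intro acc; simp [PySem.List.pyRange_neg_one_eq_nil]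
  | succ m ih =>
    intro acc
    have hcons : PySem.List.pyRange ((m + 1 : Nat) : Int) 0 (-1)
        = ((m + 1 : Nat) : Int) :: PySem.List.pyRange (((m + 1 : Nat) : Int) - 1) 0 (-1) :=
      PySem.List.pyRange_neg_one_cons (by exact_mod_cast Nat.succ_pos m)
    have hsub : ((m + 1 : Nat) : Int) - 1 = (m : Int) := by push_cast; ring
    rw [hcons, hsub]
    simp only [List.foldl_cons]
    rw [ih]
    have hmod : PySem.Int.mod ((m + 1 : Nat) : Int) 2 = (((m + 1) % 2 : Nat) : Int) :=
      PySem.Int.mod_natCast (m + 1) 2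
    rcases Nat.mod_two_eq_zero_or_one (m + 1) with h | h
    · rw [hmod, h]
      simp only [PySem.List.pyGetD, PySem.List.pyGet?, PySem.List.pyIdx?]
      norm_num
      have E1 : ((m:Int) + 1) / 2 = (m:Int) / 2 + 1 := by omega
      have E2 : ((m:Int) + 1 + 1) / 2 = (m:Int) / 2 + 1 := by omega
      rw [E1, E2]; ring
    · rw [hmod, h]
      simp only [PySem.List.pyGetD, PySem.List.pyGet?, PySem.List.pyIdx?]
      norm_num
      have E1 : ((m:Int) + 1) / 2 = (m:Int) / 2 := by omega
      have E2 : ((m:Int) + 1 + 1) / 2 = (m:Int) / 2 + 1 := by omega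
      rw [E1, E2]; ring

-- A's downward loop (nth_reflection < 0, here -m): subtracts 2c ⌈m/2⌉ times and 2(d-c) ⌊m/2⌋ times.
lemma down_loop (c d : Int) : ∀ (m : Nat) (acc : Int),
    (PySem.List.pyRange (-(m : Int)) 0 1).foldl
      (fun result i => result - PySem.List.pyGetD [2 * c, 2 * (d - c)] (PySem.Int.mod (i + 1) 2) 0) acc
    = acc - 2 * c * (((m + 1) / 2 : Nat) : Int) - 2 * (d - c) * ((m / 2 : Nat) : Int) := by
  intro m
  induction m with
  | zero => intro acc; simp [PySem.List.pyRange_one_eq_nil]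
  | succ m ih =>
    intro acc
    have hcons : PySem.List.pyRange (-((m + 1 : Nat) : Int)) 0 1
        = (-((m + 1 : Nat) : Int)) :: PySem.List.pyRange (-((m + 1 : Nat) : Int) + 1) 0 1 :=
      PySem.List.pyRange_one_cons (by push_cast; omega)
    have hadd : -((m + 1 : Nat) : Int) + 1 = -(m : Int) := by push_cast; ring
    rw [hcons, hadd]
    simp only [List.foldl_cons]
    rw [ih]
    rcases Nat.mod_two_eq_zero_or_one m with h | h
    · have hmod : PySem.Int.mod (-((m + 1 : Nat) : Int) + 1) 2 = 0 := by
        rw [hadd, PySem.Int.mod_eq_emod_of_pos (b := 2) (a := -(m:Int)) (by norm_num)]; omega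
      rw [hmod]
      simp only [PySem.List.pyGetD, PySem.List.pyGet?, PySem.List.pyIdx?]
      norm_num
      have E1 : ((m:Int) + 1) / 2 = (m:Int) / 2 := by omega
      have E2 : ((m:Int) + 1 + 1) / 2 = (m:Int) / 2 + 1 := by omega
      rw [E1, E2]; ring
    · have hmod : PySem.Int.mod (-((m + 1 : Nat) : Int) + 1) 2 = 1 := by
        rw [hadd, PySem.Int.mod_eq_emod_of_pos (b := 2) (a := -(m:Int)) (by norm_num)]; omega
      rw [hmod]
      simp only [PySem.List.pyGetD, PySem.List.pyGet?, PySem.List.pyIdx?]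
      norm_num
      have E1 : ((m:Int) + 1) / 2 = (m:Int) / 2 + 1 := by omega
      have E2 : ((m:Int) + 1 + 1) / 2 = (m:Int) / 2 + 1 := by omega
      rw [E1, E2]; ring

-- ===== VERDICT (by name: the statement is the Claim_ definition above) =====
theorem get_mirror_spec : Claim_equal_get_mirror := by
  intro n c d _
  unfold Spec_get_mirror get_mirror get_mirror_alt
  by_cases hn : n < 0
  · obtain ⟨m, hm⟩ : ∃ m : Nat, n = -(m : Int) := ⟨(-n).toNat, by omega⟩
    subst hm
    simp only [if_pos hn, if_neg (by omega : ¬ -(m : Int) ≥ 0)]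
    rw [down_loop]
    have h1 : PySem.Int.floordiv (-(-(m : Int)) + 1) 2 = (((m + 1) / 2 : Nat) : Int) := by
      have : -(-(m : Int)) + 1 = ((m + 1 : Nat) : Int) := by push_cast; ring
      rw [this]; exact_mod_cast PySem.Int.floordiv_natCast (m + 1) 2
    have h2 : -(-(m : Int)) - (((m + 1) / 2 : Nat) : Int) = ((m / 2 : Nat) : Int) := by
      have : m - (m + 1) / 2 = m / 2 := by omega
      push_cast [← this]; omega
    rw [h1, h2]
  · obtain ⟨m, hm⟩ : ∃ m : Nat, n = (m : Int) := ⟨n.toNat, by omega⟩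
    subst hm
    simp only [if_neg hn, if_pos (by omega : (m : Int) ≥ 0)]
    rw [up_loop]
    have h1 : PySem.Int.floordiv (m : Int) 2 = ((m / 2 : Nat) : Int) := by
      exact_mod_cast PySem.Int.floordiv_natCast m 2
    have h2 : (m : Int) - ((m / 2 : Nat) : Int) = (((m + 1) / 2 : Nat) : Int) := by
      have : m - m / 2 = (m + 1) / 2 := by omega
      push_cast [← this]; omega
    rw [h1, h2]
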